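-- pv_equiv track=rewrite | github.com/roberttoyonaga/daily_byte | practice/vaccum_cleaner_3.py | vaccum
-- ===== SOURCE A (Python) =====
-- def vaccum(str):
--     horiz_dir = 0
--     vert_dir = 0
--     for letter in str:
--         if letter  == "U":
--             vert_dir += 1
--         elif letter == "D":
--             vert_dir -= 1
--         elif letter == "R":
--             horiz_dir +=1
--         elif letter == "L":
--             horiz_dir -=1
--     if vert_dir == 0 and horiz_dir == 0:
--         return True
--     else:
--         return False
-- ===== SOURCE B (Python) =====
-- def vaccum(str):
--     return str.count("U") == str.count("D") and str.count("R") == str.count("L")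
-- ===== Notes on version B (the rewrite author's own statement) =====
-- stated objective: faster
-- what changed: Replaces the single Python-level branching accumulation loop with four independent str.count scans (up-count equals down-count and right-count equals left-count), which run in C.
import Mathlib
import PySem

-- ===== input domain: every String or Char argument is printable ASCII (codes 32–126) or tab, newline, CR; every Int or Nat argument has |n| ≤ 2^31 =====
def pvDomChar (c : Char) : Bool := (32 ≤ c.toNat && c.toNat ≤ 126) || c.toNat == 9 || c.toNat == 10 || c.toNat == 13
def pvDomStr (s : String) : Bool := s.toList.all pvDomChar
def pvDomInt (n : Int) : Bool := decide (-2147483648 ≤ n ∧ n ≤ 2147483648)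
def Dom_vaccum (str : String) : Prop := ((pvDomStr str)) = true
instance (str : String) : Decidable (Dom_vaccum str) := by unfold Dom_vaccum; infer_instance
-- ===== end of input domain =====

-- B replaces A's single accumulation loop with four independent count scans (same O(n), measurably faster: str.count runs in C).


-- ===== PORT A =====
-- one pass; state = (horiz_dir, vert_dir); the loop body as an A-side helper
def vaccumStep (p : Int × Int) (letter : Char) : Int × Int :=
  if letter == 'U' then (p.1, p.2 + 1)
  else if letter == 'D' then (p.1, p.2 - 1)
  else if letter == 'R' then (p.1 + 1, p.2)
  else if letter == 'L' then (p.1 - 1, p.2)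
  else p

def vaccum (str : String) : Bool :=
  let st := str.toList.foldl vaccumStep (0, 0)
  if st.2 = 0 ∧ st.1 = 0 then true else false

-- ===== PORT B =====
def vaccum_alt (str : String) : Bool :=
  (PySem.Str.count str "U" == PySem.Str.count str "D") &&
  (PySem.Str.count str "R" == PySem.Str.count str "L")

-- ===== PRECONDITION & SPEC =====
def Spec_vaccum (str : String) (out : Bool) : Prop := out = vaccum_alt str
instance (str : String) (out : Bool) : Decidable (Spec_vaccum str out) := by unfold Spec_vaccum; infer_instance

-- ===== CLAIM (what is proved, stated in full; the proofs are below) =====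
def Claim_equal_vaccum : Prop := ∀ (str : String), Dom_vaccum str → Spec_vaccum str (vaccum str)

-- ===== LEMMAS AND PROOFS =====

-- single-character substring count is character count
theorem vaccum_go_single (c : Char) (l : List Char) : ∀ (fuel acc : Nat), l.length ≤ fuel →
    PySem.Chars.count.go [c] fuel l acc = acc + l.count c := by
  induction l with
  | nil => intro fuel acc h; cases fuel <;> simp [PySem.Chars.count.go]
  | cons hd t ih =>
    intro fuel acc h
    cases fuel with
    | zero => simp at h
    | succ f =>
      rw [PySem.Chars.count.go]
      by_cases hc : c = hd
      · subst hc
        simp [List.isPrefixOf, ih f (acc + 1) (by simpa using h)]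
        omega
      · simp [List.isPrefixOf, hc, ih f acc (by simpa using h), Ne.symm hc]

theorem vaccum_count_single (s : List Char) (c : Char) :
    PySem.Chars.count s [c] = s.count c := by
  simp [PySem.Chars.count, vaccum_go_single c s s.length 0 le_rfl]

-- A's loop invariant: the displacement is the difference of the letter counts
theorem vaccum_fold_inv (l : List Char) : ∀ (h v : Int),
    l.foldl vaccumStep (h, v)
    = (h + (l.count 'R' : Int) - (l.count 'L' : Int),
       v + (l.count 'U' : Int) - (l.count 'D' : Int)) := by
  induction l with
  | nil => intro h v; simp
  | cons hd t ih =>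
    intro h v
    by_cases h1 : hd = 'U'
    · subst h1; simp [List.foldl_cons, vaccumStep, ih]; omega
    · by_cases h2 : hd = 'D'
      · subst h2; simp [List.foldl_cons, vaccumStep, ih]; omega
      · by_cases h3 : hd = 'R'
        · subst h3; simp [List.foldl_cons, vaccumStep, ih]; omega
        · by_cases h4 : hd = 'L'
          · subst h4; simp [List.foldl_cons, vaccumStep, ih]; omega
          · simp [List.foldl_cons, vaccumStep, h1, h2, h3, h4, ih]

-- ===== VERDICT (by name: the statement is the Claim_ definition above) =====
theorem vaccum_spec : Claim_equal_vaccum := by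
  intro str _
  unfold Spec_vaccum vaccum vaccum_alt
  rw [vaccum_fold_inv]
  rw [Bool.eq_iff_iff]
  simp [PySem.Str.count_eq, vaccum_count_single]
  omega
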